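-- pv_equiv track=rewrite | github.com/pypsycoder/GPT-SUPPORT | app/education/import_md.py | parse_lesson_markdown
-- ===== SOURCE A (Python) =====
-- from typing import List, Optional
--
-- def parse_lesson_markdown(md_text: str) -> List[str]:
--     lines = md_text.splitlines()
--     cards: List[List[str]] = []
--     current_block: List[str] = []
--
--     for line in lines:
--         if line.strip().startswith("## "):
--             if current_block:
--                 cards.append(current_block)
--                 current_block = []
--             current_block.append(line)
--         else:
--             if current_block:
--                 current_block.append(line)
--
--     if current_block:
--         cards.append(current_block)
--
--     # Чистим пустые строки и склеиваем
--     card_texts: List[str] = []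
--     for block in cards:
--         while block and not block[0].strip():
--             block.pop(0)
--         while block and not block[-1].strip():
--             block.pop()
--         card_md = "\n".join(block).strip()
--         if card_md:
--             card_texts.append(card_md)
--
--     return card_texts
-- ===== SOURCE B (Python) =====
-- from typing import List
--
-- def parse_lesson_markdown(md_text: str) -> List[str]:
--     def is_header(line: str) -> bool:
--         return line.strip().startswith("## ")
--
--     def blocks(lines: List[str]) -> List[List[str]]:
--         # slice-based split: one block per header, extending to the next header
--         res: List[List[str]] = []
--         i = 0
--         while i < len(lines):
--             k = i + 1
--             while k < len(lines) and not is_header(lines[k]):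
--                 k += 1
--             res.append(lines[i:k])
--             i = k
--         return res
--
--     lines = md_text.splitlines()
--     while lines and not is_header(lines[0]):
--         lines = lines[1:]
--
--     out: List[str] = []
--     for block in blocks(lines):
--         # joining then stripping also removes leading/trailing blank lines
--         text = "\n".join(block).strip()
--         if text:
--             out.append(text)
--     return out
-- ===== Notes on version B (the rewrite author's own statement) =====
-- stated objective: alternative
-- what changed: Replaces A's single-pass accumulator state machine (building blocks line by line, then popping blank boundary lines from each block) with a two-phase slice-based split: drop the preamble, cut the line list at header positions, and join+strip each slice (which subsumes the blank-line popping).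
import Mathlib
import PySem

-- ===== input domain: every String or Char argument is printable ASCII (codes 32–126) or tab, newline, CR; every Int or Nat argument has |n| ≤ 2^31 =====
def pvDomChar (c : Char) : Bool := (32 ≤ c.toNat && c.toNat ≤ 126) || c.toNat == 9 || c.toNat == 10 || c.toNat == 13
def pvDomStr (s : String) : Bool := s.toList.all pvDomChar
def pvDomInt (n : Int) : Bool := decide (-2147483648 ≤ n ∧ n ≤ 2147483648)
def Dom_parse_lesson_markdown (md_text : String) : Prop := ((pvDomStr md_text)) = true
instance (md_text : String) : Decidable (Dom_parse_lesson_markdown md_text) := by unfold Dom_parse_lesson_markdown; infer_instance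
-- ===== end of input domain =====

-- B replaces A's one-pass accumulator state machine by a two-phase slice-at-headers split
-- with a join+strip cleanup (alternative decomposition, same cost).

-- ===== PORT A =====
def pvIsHeaderA (line : String) : Bool :=
  PySem.Str.startswith (PySem.Str.strip line) "## "

def pvStepA (st : List (List String) × List String) (line : String) :
    List (List String) × List String :=
  if pvIsHeaderA line then
    if st.2.isEmpty then (st.1, [line]) else (st.1 ++ [st.2], [line])
  else
    if st.2.isEmpty then st else (st.1, st.2 ++ [line])

def pvBlankA (l : String) : Bool := PySem.Str.strip l == ""

-- while block and not block[0].strip(): block.pop(0)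
def pvPopLeadingA : List String → List String
  | [] => []
  | l :: rest => if pvBlankA l then pvPopLeadingA rest else l :: rest

-- while block and not block[-1].strip(): block.pop()
def pvPopTrailingA (b : List String) : List String :=
  match h : b.getLast? with
  | none => b
  | some l =>
    if pvBlankA l then pvPopTrailingA b.dropLast else b
termination_by b.length
decreasing_by
  have : b ≠ [] := by intro hb; simp [hb] at h
  simpa [List.length_dropLast] using Nat.sub_lt (List.length_pos_iff.mpr this) one_pos

def parse_lesson_markdown (md_text : String) : List String :=
  let lines := PySem.Str.splitlines md_text
  let st := lines.foldl pvStepA ([], [])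
  let cards := if st.2.isEmpty then st.1 else st.1 ++ [st.2]
  cards.foldl (fun acc block =>
    let b := pvPopTrailingA (pvPopLeadingA block)
    let card := PySem.Str.strip (PySem.Str.join "\n" b)
    if card ≠ "" then acc ++ [card] else acc) []

-- ===== PORT B =====
def pvIsHeaderB (line : String) : Bool :=
  PySem.Str.startswith (PySem.Str.strip line) "## "

-- Source B 'blocks': cut the line list at header positions (inner while = scan to next header)
def pvBlocksB (lines : List String) : List (List String) :=
  match lines with
  | [] => []
  | h :: rest =>
    (h :: rest.takeWhile (fun l => !pvIsHeaderB l)) ::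
      pvBlocksB (rest.dropWhile (fun l => !pvIsHeaderB l))
termination_by lines.length
decreasing_by
  simpa using Nat.lt_succ_of_le (List.length_dropWhile_le _ _)

def parse_lesson_markdown_alt (md_text : String) : List String :=
  let lines := (PySem.Str.splitlines md_text).dropWhile (fun l => !pvIsHeaderB l)
  (pvBlocksB lines).foldl (fun acc block =>
    let text := PySem.Str.strip (PySem.Str.join "\n" block)
    if text ≠ "" then acc ++ [text] else acc) []

-- ===== PRECONDITION & SPEC =====
def Spec_parse_lesson_markdown (md_text : String) (out : List String) : Prop := out = parse_lesson_markdown_alt md_text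
instance (md_text : String) (out : List String) : Decidable (Spec_parse_lesson_markdown md_text out) := by unfold Spec_parse_lesson_markdown; infer_instance

-- ===== CLAIM (what is proved, stated in full; the proofs are below) =====
def Claim_equal_parse_lesson_markdown : Prop := ∀ (md_text : String), Dom_parse_lesson_markdown md_text → Spec_parse_lesson_markdown md_text (parse_lesson_markdown md_text)


-- ===== LEMMAS AND PROOFS =====

theorem pv_headerB_eq : pvIsHeaderB = pvIsHeaderA := rfl

theorem pvIsHeaderB_def (l : String) : pvIsHeaderB l = pvIsHeaderA l := rfl

-- grouping: A's fold-with-flush equals B's slice-at-headers split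
set_option maxHeartbeats 2000000 in
theorem pv_group (L : List String) : ∀ (cards : List (List String)) (cur : List String),
    (if (L.foldl pvStepA (cards, cur)).2.isEmpty then (L.foldl pvStepA (cards, cur)).1
     else (L.foldl pvStepA (cards, cur)).1 ++ [(L.foldl pvStepA (cards, cur)).2])
    = cards ++ (if cur.isEmpty then [] else [cur ++ L.takeWhile (fun l => !pvIsHeaderA l)])
            ++ pvBlocksB (L.dropWhile (fun l => !pvIsHeaderA l)) := by
  induction L with
  | nil =>
    intro cards cur
    cases cur <;> simp [pvBlocksB]
  | cons a L ih =>
    intro cards cur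
    simp only [List.foldl_cons]
    by_cases ha : pvIsHeaderA a = true
    · cases cur with
      | nil =>
        rw [show pvStepA (cards, []) a = (cards, [a]) by simp [pvStepA, ha]]
        rw [ih cards [a]]
        rw [show List.dropWhile (fun l => !pvIsHeaderA l) (a :: L) = a :: L by
              simp [ha]]
        rw [pvBlocksB]
        simp [pvIsHeaderB_def]
      | cons c cs =>
        rw [show pvStepA (cards, c :: cs) a = (cards ++ [c :: cs], [a]) by
              simp [pvStepA, ha]]
        rw [ih (cards ++ [c :: cs]) [a]]
        rw [show List.dropWhile (fun l => !pvIsHeaderA l) (a :: L) = a :: L by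
              simp [ha]]
        rw [pvBlocksB]
        simp [pvIsHeaderB_def, ha]
    · simp only [Bool.not_eq_true] at ha
      cases cur with
      | nil =>
        rw [show pvStepA (cards, []) a = (cards, []) by simp [pvStepA, ha]]
        rw [ih cards []]
        simp [ha]
      | cons c cs =>
        rw [show pvStepA (cards, c :: cs) a = (cards, (c :: cs) ++ [a]) by
              simp [pvStepA, ha]]
        rw [ih cards ((c :: cs) ++ [a])]
        simp [ha]

-- whitespace lemmas at the List Char level

theorem pv_mem_of_mem_dropWhile {α : Type} {p : α → Bool} {l : List α} {x : α}
    (h : x ∈ List.dropWhile p l) : x ∈ l :=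
  (List.dropWhile_sublist p (l := l)).mem h

theorem pv_allspace_of_strip_nil (w : List Char) (h : PySem.Chars.strip w = []) :
    ∀ c ∈ w, PySem.Chars.isspace c = true := by
  intro c hc
  have hr : PySem.Chars.rstrip (List.dropWhile PySem.Chars.isspace w) = [] := by
    simpa [PySem.Chars.strip, PySem.Chars.lstrip] using h
  have hd : List.dropWhile PySem.Chars.isspace
      (List.dropWhile PySem.Chars.isspace w).reverse = [] := by
    have := congrArg List.reverse hr
    simpa [PySem.Chars.rstrip] using this
  have hall : ∀ x ∈ List.dropWhile PySem.Chars.isspace w, PySem.Chars.isspace x = true := by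
    intro x hx
    exact List.dropWhile_eq_nil_iff.mp hd x (by simpa using hx)
  rw [← List.takeWhile_append_dropWhile (p := PySem.Chars.isspace) (l := w)] at hc
  rcases List.mem_append.mp hc with h1 | h2
  · exact List.mem_takeWhile_imp h1
  · exact hall _ h2

theorem pv_strip_prepend_ws (w s : List Char)
    (hw : ∀ c ∈ w, PySem.Chars.isspace c = true) :
    PySem.Chars.strip (w ++ s) = PySem.Chars.strip s := by
  simp [PySem.Chars.strip, PySem.Chars.lstrip, List.dropWhile_append,
        List.dropWhile_eq_nil_iff.mpr hw]

theorem pv_rstrip_ws (w : List Char) (hw : ∀ c ∈ w, PySem.Chars.isspace c = true) :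
    PySem.Chars.rstrip w = [] := by
  simp [PySem.Chars.rstrip,
        List.dropWhile_eq_nil_iff.mpr (fun x hx => hw x (List.mem_reverse.mp hx))]

theorem pv_rstrip_append_ws (z w : List Char)
    (hw : ∀ c ∈ w, PySem.Chars.isspace c = true) :
    PySem.Chars.rstrip (z ++ w) = PySem.Chars.rstrip z := by
  simp [PySem.Chars.rstrip, List.dropWhile_append,
        List.dropWhile_eq_nil_iff.mpr (fun x hx => hw x (List.mem_reverse.mp hx))]

theorem pv_strip_append_ws (s w : List Char)
    (hw : ∀ c ∈ w, PySem.Chars.isspace c = true) :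
    PySem.Chars.strip (s ++ w) = PySem.Chars.strip s := by
  unfold PySem.Chars.strip PySem.Chars.lstrip
  rw [List.dropWhile_append]
  by_cases hs : (List.dropWhile PySem.Chars.isspace s).isEmpty
  · rw [if_pos hs, List.isEmpty_iff.mp hs,
        pv_rstrip_ws _ (fun x hx => hw x (pv_mem_of_mem_dropWhile hx))]
    rfl
  · rw [if_neg hs]
    exact pv_rstrip_append_ws _ _ hw

-- a blank line (strip l == "") consists of whitespace only
theorem pv_blank_allspace (l : String) (h : pvBlankA l = true) :
    ∀ c ∈ l.toList, PySem.Chars.isspace c = true := by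
  have h1 : PySem.Str.strip l = "" := by
    simpa [pvBlankA] using h
  have h2 : PySem.Chars.strip l.toList = [] := by
    rw [← PySem.Str.toList_strip, h1]
    rfl
  exact pv_allspace_of_strip_nil _ h2

theorem pv_join_concat (sep : List Char) :
    ∀ (xs : List (List Char)) (a l : List Char),
      PySem.Chars.join sep (a :: xs ++ [l]) = PySem.Chars.join sep (a :: xs) ++ sep ++ l := by
  intro xs
  induction xs with
  | nil =>
    intro a l
    simp [PySem.Chars.join_cons_cons, PySem.Chars.join_singleton]
  | cons x t ih =>
    intro a l
    rw [PySem.Chars.join_cons_cons sep a x t]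
    rw [show a :: (x :: t) ++ [l] = a :: (x :: (t ++ [l])) from by simp]
    rw [PySem.Chars.join_cons_cons sep a x (t ++ [l])]
    rw [show x :: (t ++ [l]) = x :: t ++ [l] from by simp]
    rw [ih x l]
    simp [List.append_assoc]

-- cleanup: joining then stripping absorbs popping blank boundary lines
theorem pv_clean_leading (b : List String) :
    PySem.Str.strip (PySem.Str.join "\n" (pvPopLeadingA b))
      = PySem.Str.strip (PySem.Str.join "\n" b) := by
  induction b with
  | nil => rfl
  | cons l rest ih =>
    unfold pvPopLeadingA
    by_cases hb : pvBlankA l = true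
    · rw [if_pos hb, ih]
      apply String.toList_inj.mp
      rw [PySem.Str.toList_strip, PySem.Str.toList_strip, PySem.Str.toList_join,
          PySem.Str.toList_join]
      cases rest with
      | nil =>
        simp only [List.map_cons, List.map_nil, PySem.Chars.join_singleton,
          PySem.Chars.join_nil]
        have h2 : PySem.Chars.strip l.toList = [] := by
          have h1 : PySem.Str.strip l = "" := by simpa [pvBlankA] using hb
          rw [← PySem.Str.toList_strip, h1]; rfl
        simpa [PySem.Chars.strip, PySem.Chars.lstrip, PySem.Chars.rstrip] using h2.symm
      | cons r t =>
        simp only [List.map_cons]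
        rw [PySem.Chars.join_cons_cons, pv_strip_prepend_ws]
        intro c hc
        rcases List.mem_append.mp hc with h1 | h2
        · exact pv_blank_allspace l hb c h1
        · have hc2 : c = '\n' := by simpa using h2
          subst hc2; decide
    · rw [if_neg hb]

theorem pv_clean_trailing (b : List String) :
    PySem.Str.strip (PySem.Str.join "\n" (pvPopTrailingA b))
      = PySem.Str.strip (PySem.Str.join "\n" b) := by
  rw [pvPopTrailingA]
  split
  · rfl
  · rename_i l hlast
    by_cases hb : pvBlankA l = true
    · rw [if_pos hb]
      have hlt : b.dropLast.length < b.length := by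
        have hne : b ≠ [] := by intro hcon; rw [hcon] at hlast; simp at hlast
        simpa [List.length_dropLast] using Nat.sub_lt (List.length_pos_iff.mpr hne) one_pos
      rw [pv_clean_trailing b.dropLast]
      have hsplit : b.dropLast ++ [l] = b := List.dropLast_append_getLast? l hlast
      conv_rhs => rw [← hsplit]
      apply String.toList_inj.mp
      rw [PySem.Str.toList_strip, PySem.Str.toList_strip, PySem.Str.toList_join,
          PySem.Str.toList_join]
      cases hd : b.dropLast with
      | nil =>
        simp only [List.map_nil, List.map_cons, PySem.Chars.join_nil, List.nil_append,
          PySem.Chars.join_singleton]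
        have h2 : PySem.Chars.strip l.toList = [] := by
          have h1 : PySem.Str.strip l = "" := by simpa [pvBlankA] using hb
          rw [← PySem.Str.toList_strip, h1]; rfl
        simpa [PySem.Chars.strip, PySem.Chars.lstrip, PySem.Chars.rstrip] using h2.symm
      | cons x t =>
        simp only [List.map_append, List.map_cons, List.map_nil]
        rw [pv_join_concat, List.append_assoc, pv_strip_append_ws]
        intro c hc
        rcases List.mem_append.mp hc with h1 | h2
        · have hc2 : c = '\n' := by simpa using h1
          subst hc2; decide
        · exact pv_blank_allspace l hb c h2
    · rw [if_neg hb]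
termination_by b.length
decreasing_by
  exact hlt

theorem pv_clean (block : List String) :
    PySem.Str.strip (PySem.Str.join "\n" (pvPopTrailingA (pvPopLeadingA block)))
      = PySem.Str.strip (PySem.Str.join "\n" block) := by
  rw [pv_clean_trailing, pv_clean_leading]

-- ===== VERDICT (by name: the statement is the Claim_ definition above) =====
theorem parse_lesson_markdown_spec : Claim_equal_parse_lesson_markdown := by
  intro md _
  unfold Spec_parse_lesson_markdown parse_lesson_markdown parse_lesson_markdown_alt
  simp only []
  rw [pv_headerB_eq]
  have hg := pv_group (PySem.Str.splitlines md) [] []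
  simp only [List.isEmpty_nil, if_true, List.nil_append] at hg
  rw [hg]
  have hf : (fun (acc : List String) (block : List String) =>
        if PySem.Str.strip (PySem.Str.join "\n" (pvPopTrailingA (pvPopLeadingA block))) ≠ ""
        then acc ++ [PySem.Str.strip (PySem.Str.join "\n" (pvPopTrailingA (pvPopLeadingA block)))]
        else acc)
      = (fun (acc : List String) (block : List String) =>
        if PySem.Str.strip (PySem.Str.join "\n" block) ≠ ""
        then acc ++ [PySem.Str.strip (PySem.Str.join "\n" block)] else acc) := by
    funext acc block
    rw [pv_clean]
  rw [hf]
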